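-- pv_equiv track=rewrite | github.com/swrookie/coding-practice | boj/problem2226/main.py | solve
-- ===== SOURCE A (Python) =====
-- def solve(N: int) -> str:
--     answer = 0
--     one_start_arr = [0, 1]
--     zero_start_arr = [0, 1]
--
--     if N == 1 or N == 2:
--         return str(one_start_arr[N - 1])
--
--     for i in range(2, N, 1):
--         prev_one_start_zero_cnt = one_start_arr[1]
--         prev_zero_start_zero_cnt = zero_start_arr[1]
--
--         if (i - 1) % 2 != 0:
--             one_start_arr[1] = prev_one_start_zero_cnt + prev_zero_start_zero_cnt - 1
--             one_start_arr[0] = prev_one_start_zero_cnt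
--             zero_start_arr[1] = prev_one_start_zero_cnt + prev_zero_start_zero_cnt
--             zero_start_arr[0] = prev_zero_start_zero_cnt
--         else:
--             one_start_arr[1] = prev_one_start_zero_cnt + prev_zero_start_zero_cnt
--             one_start_arr[0] = prev_one_start_zero_cnt
--             zero_start_arr[1] = prev_one_start_zero_cnt + prev_zero_start_zero_cnt
--             zero_start_arr[0] = prev_zero_start_zero_cnt
--
--     answer = one_start_arr[1]
--
--     return str(answer)
-- ===== SOURCE B (Python) =====
-- def solve(N: int) -> str:
--     # Closed form of the Jacobsthal-style recurrence: answer(N) = (2^(N-1) - (-1)^(N-1)) divided by three.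
--     n = N - 1
--     sign = -1 if n % 2 else 1
--     return str(((1 << n) - sign) // 3)
-- ===== Notes on version B (the rewrite author's own statement) =====
-- stated objective: faster
-- what changed: Replaces the O(N) iterative two-sequence DP by the closed form (2^(N-1) - (-1)^(N-1)) divided by three, computed with one bit shift.
-- outside the precondition, e.g. on solve(0): A returns '1', B raises ValueError; on solve(-1): A returns '1', B raises ValueError
import Mathlib
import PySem

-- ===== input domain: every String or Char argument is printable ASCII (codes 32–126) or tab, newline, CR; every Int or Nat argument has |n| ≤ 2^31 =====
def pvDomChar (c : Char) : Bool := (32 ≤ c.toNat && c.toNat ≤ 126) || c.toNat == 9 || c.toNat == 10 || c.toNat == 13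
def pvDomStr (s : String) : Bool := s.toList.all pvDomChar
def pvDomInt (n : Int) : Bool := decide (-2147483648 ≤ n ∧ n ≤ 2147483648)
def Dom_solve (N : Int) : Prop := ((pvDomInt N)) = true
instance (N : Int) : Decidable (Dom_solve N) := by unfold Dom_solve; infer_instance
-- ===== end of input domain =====

-- B replaces A's O(N) two-sequence DP loop by the closed form (2^(N-1) - (-1)^(N-1)) divided by three (objective: faster).

-- ===== PORT A =====
-- Loop body of A; the two length-2 Python lists one_start_arr/zero_start_arr are
-- modelled as pairs (element 0, element 1); the state is (one_start, zero_start).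
def solveStep (st : (Int × Int) × (Int × Int)) (i : Int) : (Int × Int) × (Int × Int) :=
  let prev_one_start_zero_cnt := st.1.2
  let prev_zero_start_zero_cnt := st.2.2
  if PySem.Int.mod (i - 1) 2 ≠ 0 then
    ((prev_one_start_zero_cnt, prev_one_start_zero_cnt + prev_zero_start_zero_cnt - 1),
     (prev_zero_start_zero_cnt, prev_one_start_zero_cnt + prev_zero_start_zero_cnt))
  else
    ((prev_one_start_zero_cnt, prev_one_start_zero_cnt + prev_zero_start_zero_cnt),
     (prev_zero_start_zero_cnt, prev_one_start_zero_cnt + prev_zero_start_zero_cnt))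

def solve (N : Int) : String :=
  let one_start_arr : Int × Int := (0, 1)
  let zero_start_arr : Int × Int := (0, 1)
  if N = 1 ∨ N = 2 then
    -- one_start_arr[N - 1] with N - 1 ∈ {0, 1}
    PySem.Int.toStr (if N = 1 then one_start_arr.1 else one_start_arr.2)
  else
    let st := (PySem.List.pyRange 2 N 1).foldl solveStep (one_start_arr, zero_start_arr)
    PySem.Int.toStr st.1.2

-- ===== PORT B =====
def solve_alt (N : Int) : String :=
  let n := N - 1
  let sign : Int := if PySem.Int.mod n 2 ≠ 0 then -1 else 1
  -- '1 << n' = 2^n; exact since Pre_solve gives 0 ≤ n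
  PySem.Int.toStr (PySem.Int.floordiv (2 ^ n.toNat - sign) 3)

-- ===== PRECONDITION & SPEC =====
-- Pre_ excludes N ≤ 0 (outside the problem's natural domain N ≥ 1): there A returns
-- its untouched initial state '1' while B's shift '1 << (N-1)' raises ValueError.
def Pre_solve (N : Int) : Prop := 1 ≤ N
instance (N : Int) : Decidable (Pre_solve N) := by unfold Pre_solve; infer_instance
def pvWitness_solve : Int := (5)

def Spec_solve (N : Int) (out : String) : Prop := out = solve_alt N
instance (N : Int) (out : String) : Decidable (Spec_solve N out) := by unfold Spec_solve; infer_instance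

-- ===== CLAIM (what is proved, stated in full; the proofs are below) =====
def Claim_equal_solve : Prop := ∀ (N : Int), Dom_solve N → Pre_solve N → Spec_solve N (solve N)

-- ===== LEMMAS AND PROOFS =====

-- Invariant of A's loop: after folding over range(2, 2+m), with o1 the second slot of
-- one_start and z1 the second slot of zero_start, 3*o1 = 2^(m+1) - (-1)^(m+1) and
-- 6*z1 = 2^(m+2) + (-1)^(m+1) + 3.
theorem solve_inv (m : Nat) :
    3 * ((PySem.List.pyRange 2 (2 + (m : Int)) 1).foldl solveStep ((0, 1), (0, 1))).1.2
      = 2 ^ (m + 1) - (-1 : Int) ^ (m + 1)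
    ∧ 6 * ((PySem.List.pyRange 2 (2 + (m : Int)) 1).foldl solveStep ((0, 1), (0, 1))).2.2
      = 2 ^ (m + 2) + (-1 : Int) ^ (m + 1) + 3 := by
  induction m with
  | zero =>
    rw [show (2 + ((0 : Nat) : Int)) = 2 by norm_num, PySem.List.pyRange_one_eq_nil (by omega)]
    norm_num
  | succ m ih =>
    have hsplit : (2 + ((m + 1 : Nat) : Int)) = (2 + (m : Int)) + 1 := by push_cast; ring
    rw [hsplit, PySem.List.pyRange_one_succ_right (by omega), List.foldl_append]
    obtain ⟨h1, h2⟩ := ih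
    set st := (PySem.List.pyRange 2 (2 + (m : Int)) 1).foldl solveStep ((0, 1), (0, 1)) with hst
    have hmod : PySem.Int.mod (2 + (m : Int) - 1) 2 = (((m + 1) % 2 : Nat) : Int) := by
      rw [show (2 + (m : Int) - 1) = ((m + 1 : Nat) : Int) by push_cast; ring]
      exact_mod_cast PySem.Int.mod_natCast (m + 1) 2
    rcases Nat.even_or_odd (m + 1) with he | ho
    · have hm0 : (m + 1) % 2 = 0 := Nat.even_iff.mp he
      have hp1 : (-1 : Int) ^ (m + 1) = 1 := he.neg_one_pow
      have hp2 : (-1 : Int) ^ (m + 2) = -1 := by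
        rw [pow_succ, hp1]; ring
      simp only [List.foldl, solveStep, hmod, hm0]
      norm_num
      constructor
      · have e : (2 : Int) ^ (m + 2) = 2 * 2 ^ (m + 1) := by ring
        rw [hp2]; rw [hp1] at h1 h2; linarith
      · have e : (2 : Int) ^ (m + 1 + 2) = 2 * 2 ^ (m + 2) := by ring
        have e2 : (2 : Int) ^ (m + 2) = 2 * 2 ^ (m + 1) := by ring
        rw [hp2]; rw [hp1] at h1 h2; linarith
    · have hm1 : (m + 1) % 2 = 1 := Nat.odd_iff.mp ho
      have hp1 : (-1 : Int) ^ (m + 1) = -1 := ho.neg_one_pow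
      have hp2 : (-1 : Int) ^ (m + 2) = 1 := by
        rw [pow_succ, hp1]; ring
      simp only [List.foldl, solveStep, hmod, hm1]
      norm_num
      constructor
      · have e : (2 : Int) ^ (m + 2) = 2 * 2 ^ (m + 1) := by ring
        rw [hp2]; rw [hp1] at h1 h2; linarith
      · have e : (2 : Int) ^ (m + 1 + 2) = 2 * 2 ^ (m + 2) := by ring
        have e2 : (2 : Int) ^ (m + 2) = 2 * 2 ^ (m + 1) := by ring
        rw [hp2]; rw [hp1] at h1 h2; linarith

theorem floordiv_three_mul (x : Int) : PySem.Int.floordiv (3 * x) 3 = x := by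
  rw [PySem.Int.floordiv_eq_ediv_of_pos (by norm_num)]
  exact Int.mul_ediv_cancel_left x (by norm_num)

-- ===== VERDICT (by name: the statement is the Claim_ definition above) =====
theorem solve_spec : Claim_equal_solve := by
  unfold Claim_equal_solve
  intro N _ hpre
  unfold Pre_solve at hpre
  unfold Spec_solve
  by_cases h1 : N = 1
  · subst h1; rfl
  by_cases h2 : N = 2
  · subst h2; rfl
  -- N ≥ 3
  have h3 : 3 ≤ N := by omega
  obtain ⟨m, hm⟩ : ∃ m : Nat, N = 2 + (m : Int) := ⟨(N - 2).toNat, by omega⟩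
  subst hm
  unfold solve solve_alt
  simp only [if_neg (show ¬(2 + (m : Int) = 1 ∨ 2 + (m : Int) = 2) by omega)]
  obtain ⟨hinv, -⟩ := solve_inv m
  have htn : (2 + (m : Int) - 1).toNat = m + 1 := by omega
  have hmodB : PySem.Int.mod (2 + (m : Int) - 1) 2 = (((m + 1) % 2 : Nat) : Int) := by
    rw [show (2 + (m : Int) - 1) = ((m + 1 : Nat) : Int) by push_cast; ring]
    exact_mod_cast PySem.Int.mod_natCast (m + 1) 2
  have hsign : (if PySem.Int.mod (2 + (m : Int) - 1) 2 ≠ 0 then (-1 : Int) else 1)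
      = (-1 : Int) ^ (m + 1) := by
    rw [hmodB]
    rcases Nat.even_or_odd (m + 1) with he | ho
    · rw [Nat.even_iff.mp he, he.neg_one_pow]; norm_num
    · rw [Nat.odd_iff.mp ho, ho.neg_one_pow]; norm_num
  simp only [hsign, htn]
  rw [← hinv, floordiv_three_mul]
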